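-- pv_equiv track=rewrite | github.com/mei28/Competitive-programing | ABC-225/C.py | check
-- ===== SOURCE A (Python) =====
-- def check(s):
--     pre = s[0]
--     pre_a = (s[0] - 1) % 7
--     for i in range(1, len(s)):
--         if s[i] - pre != 1:
--             return False
--         if pre_a > (s[i] - 1) % 7:
--             return False
--         pre = s[i]
--         pre_a = (s[i] - 1) % 7
--     return True
-- ===== SOURCE B (Python) =====
-- def check(s):
--     a = s[0]
--     n = len(s)
--     return s == list(range(a, a + n)) and (a - 1) % 7 + n <= 7
-- ===== Notes on version B (the rewrite author's own statement) =====
-- stated objective: simpler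
-- what changed: Replaces the per-element loop tracking previous value and previous weekday column with a build-and-compare: s must equal the contiguous range starting at its first element, plus one arithmetic check that the run fits in a single week row. Pre_ excludes the empty list, on which A and B both raise IndexError reading the first element.
import Mathlib
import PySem

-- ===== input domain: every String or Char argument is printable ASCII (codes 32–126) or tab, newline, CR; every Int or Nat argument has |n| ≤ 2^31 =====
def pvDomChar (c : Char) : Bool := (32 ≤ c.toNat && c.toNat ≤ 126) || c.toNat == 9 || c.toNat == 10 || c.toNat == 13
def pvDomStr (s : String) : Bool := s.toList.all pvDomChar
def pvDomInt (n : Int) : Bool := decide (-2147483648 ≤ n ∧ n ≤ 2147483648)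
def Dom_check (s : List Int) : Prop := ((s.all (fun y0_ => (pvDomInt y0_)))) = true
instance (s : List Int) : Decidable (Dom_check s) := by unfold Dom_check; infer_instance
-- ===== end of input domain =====

-- B replaces A's per-element loop by a build-and-compare (range equality + one row-fit arithmetic check); same O(n) cost, simpler.

-- ===== PORT A =====
-- the for-loop with early returns, carrying (pre, pre_a)
def checkLoop (pre pre_a : Int) : List Int → Bool
  | [] => true
  | x :: xs =>
    if x - pre ≠ 1 then false
    else if pre_a > PySem.Int.mod (x - 1) 7 then false
    else checkLoop x (PySem.Int.mod (x - 1) 7) xs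

def check (s : List Int) : Bool :=
  match s with
  | [] => false  -- unreachable under Pre_check: Python raises IndexError reading the first element
  | a :: xs => checkLoop a (PySem.Int.mod (a - 1) 7) xs

-- ===== PORT B =====
def check_alt (s : List Int) : Bool :=
  match s with
  | [] => false  -- unreachable under Pre_check: Python raises IndexError reading the first element
  | a :: _ =>
    decide (s = PySem.List.pyRange a (a + s.length) 1) &&
    decide (PySem.Int.mod (a - 1) 7 + s.length ≤ 7)

-- ===== PRECONDITION & SPEC =====
-- Pre_ excludes only the empty list, on which Python A raises IndexError reading the first element.
def Pre_check (s : List Int) : Prop := s ≠ []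
instance (s : List Int) : Decidable (Pre_check s) := by unfold Pre_check; infer_instance
def pvWitness_check : List Int := [8, 9, 10]

def Spec_check (s : List Int) (out : Bool) : Prop := out = check_alt s
instance (s : List Int) (out : Bool) : Decidable (Spec_check s out) := by unfold Spec_check; infer_instance

-- ===== CLAIM (what is proved, stated in full; the proofs are below) =====
def Claim_equal_check : Prop := ∀ (s : List Int), Dom_check s → Pre_check s → Spec_check s (check s)

-- ===== LEMMAS AND PROOFS =====

-- loop invariant: A's loop from previous value p accepts exactly the contiguous
-- continuation of p that stays within p's week row
theorem checkLoop_eq (xs : List Int) (p : Int) :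
    checkLoop p (PySem.Int.mod (p - 1) 7) xs
      = decide (xs = PySem.List.pyRange (p + 1) (p + 1 + xs.length) 1
          ∧ PySem.Int.mod (p - 1) 7 + xs.length ≤ 6) := by
  induction xs generalizing p with
  | nil =>
    have h6 : PySem.Int.mod (p - 1) 7 < 7 := PySem.Int.mod_lt _ (by norm_num)
    simp [checkLoop]
    omega
  | cons x t ih =>
    have hm1 : PySem.Int.mod (p - 1) 7 = (p - 1) % 7 := PySem.Int.mod_eq_emod_of_pos (by norm_num)
    have hm2 : PySem.Int.mod (x - 1) 7 = (x - 1) % 7 := PySem.Int.mod_eq_emod_of_pos (by norm_num)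
    have hcons : PySem.List.pyRange (p + 1) (p + 1 + ((t.length : Int) + 1)) 1
        = (p + 1) :: PySem.List.pyRange (p + 2) (p + 1 + ((t.length : Int) + 1)) 1 := by
      rw [PySem.List.pyRange_one_cons (by omega), show ((p : Int) + 1 + 1) = p + 2 by ring]
    by_cases hx : x = p + 1
    · subst hx
      by_cases hw : (p - 1) % 7 = 6
      · -- row boundary crossed: both sides false
        simp only [checkLoop, hm1, hm2, hcons] at *
        have hlt : p % 7 < (p - 1) % 7 := by omega
        have hf : ¬((p - 1) % 7 + ((t.length : Int) + 1) ≤ 6) := by omega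
        simp [hlt, hf]
      · -- continue: use the IH at p+1
        have hm0 : PySem.Int.mod p 7 = p % 7 := PySem.Int.mod_eq_emod_of_pos (by norm_num)
        have hnlt : ¬(p % 7 < (p - 1) % 7) := by omega
        have hcons2 : PySem.List.pyRange (p + 1) (p + 2 + (t.length : Int)) 1
            = (p + 1) :: PySem.List.pyRange (p + 2) (p + 2 + (t.length : Int)) 1 := by
          rw [PySem.List.pyRange_one_cons (by omega), show ((p : Int) + 1 + 1) = p + 2 by ring]
        have key := ih (p + 1)
        simp only [checkLoop, hm0, hm1, List.length_cons,
          show ((p + 1 : Int)) - 1 = p by ring] at key ⊢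
        rw [key]
        push_cast
        rw [show ((p : Int) + 1 + ((t.length : Int) + 1)) = p + 2 + (t.length : Int) by ring,
            show ((p : Int) + 1 + 1) = p + 2 by ring, hcons2]
        simp [hnlt]
        congr 1
        exact decide_eq_decide.mpr (by omega)
    · -- first element wrong: both sides false
      have hne : ¬(x - p = 1) := by omega
      simp [checkLoop, hcons, hne, hx]

-- ===== VERDICT (by name: the statement is the Claim_ definition above) =====
theorem check_spec : Claim_equal_check := by
  intro s _ hp
  unfold Spec_check
  cases s with
  | nil => exact absurd rfl hp
  | cons a xs =>
    have h6 : PySem.Int.mod (a - 1) 7 < 7 := PySem.Int.mod_lt _ (by norm_num)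
    have h0 : (0 : Int) ≤ PySem.Int.mod (a - 1) 7 := PySem.Int.mod_nonneg _ (by norm_num)
    simp only [check, check_alt, checkLoop_eq]
    have hcons : PySem.List.pyRange a (a + (((a :: xs).length : Int))) 1
        = a :: PySem.List.pyRange (a + 1) (a + (((a :: xs).length : Int))) 1 := by
      rw [PySem.List.pyRange_one_cons
        (by simp only [List.length_cons]; push_cast; omega)]
    rw [hcons]
    simp [show (a : Int) + ((xs.length : Int) + 1) = a + 1 + (xs.length : Int) by ring]
    congr 1
    exact decide_eq_decide.mpr (by omega)
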